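-- pv_equiv track=rewrite | github.com/ChantalMP/DotsAndBoxesAi | testen.py | convert_action_to_move
-- ===== SOURCE A (Python) =====
-- width = 4
--
-- def convert_action_to_move(action):
--     array_i = 0
--     w = 0
--     h = 0
--     for i in range(action):
--         w += 1
--         if w >= width + array_i:
--             w = 0
--             if array_i == 1:
--                 h += 1
--             array_i = 1 - array_i
--
--     return array_i, h, w
-- ===== SOURCE B (Python) =====
-- def convert_action_to_move(action):
--     if action <= 0:
--         return (0, 0, 0)
--     h, r = divmod(action, 9)
--     return (0, h, r) if r < 4 else (1, h, r - 4)
-- ===== Notes on version B (the rewrite author's own statement) =====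
-- stated objective: faster
-- what changed: Replaced A's per-action simulation loop with a closed-form divmod by the period of the alternating row widths.
import Mathlib
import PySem

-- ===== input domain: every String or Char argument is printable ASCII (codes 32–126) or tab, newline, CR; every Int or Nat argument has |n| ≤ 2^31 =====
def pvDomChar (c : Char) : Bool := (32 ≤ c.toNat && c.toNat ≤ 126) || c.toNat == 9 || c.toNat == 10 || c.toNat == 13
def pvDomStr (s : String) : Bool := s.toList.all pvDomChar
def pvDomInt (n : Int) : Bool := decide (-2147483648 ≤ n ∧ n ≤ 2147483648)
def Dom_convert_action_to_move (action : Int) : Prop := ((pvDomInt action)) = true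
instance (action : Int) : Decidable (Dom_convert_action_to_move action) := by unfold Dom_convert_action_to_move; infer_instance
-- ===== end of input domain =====

-- B replaces A's O(action) simulation loop by an O(1) closed form: divmod by the period 9.

-- ===== PORT A =====
-- one iteration of A's for-loop body on the state (array_i, h, w)
def pvStepA (st : Int × Int × Int) : Int × Int × Int :=
  let array_i := st.1
  let h := st.2.1
  let w := st.2.2 + 1
  if w ≥ 4 + array_i then
    (1 - array_i, (if array_i = 1 then h + 1 else h), 0)
  else
    (array_i, h, w)

def convert_action_to_move (action : Int) : List Int :=
  let st := (PySem.List.pyRange 0 action 1).foldl (fun st _ => pvStepA st) (0, 0, 0)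
  [st.1, st.2.1, st.2.2]

-- ===== PORT B =====
def convert_action_to_move_alt (action : Int) : List Int :=
  if action ≤ 0 then [0, 0, 0]
  else
    let h := PySem.Int.floordiv action 9
    let r := PySem.Int.mod action 9
    if r < 4 then [0, h, r] else [1, h, r - 4]

-- ===== PRECONDITION & SPEC =====
def Spec_convert_action_to_move (action : Int) (out : List Int) : Prop := out = convert_action_to_move_alt action
instance (action : Int) (out : List Int) : Decidable (Spec_convert_action_to_move action out) := by unfold Spec_convert_action_to_move; infer_instance

-- ===== CLAIM (what is proved, stated in full; the proofs are below) =====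
def Claim_equal_convert_action_to_move : Prop := ∀ (action : Int), Dom_convert_action_to_move action → Spec_convert_action_to_move action (convert_action_to_move action)

-- ===== LEMMAS AND PROOFS =====

-- closed form of A's loop after n iterations
lemma pv_loop_closed (n : Nat) :
    (PySem.List.pyRange 0 (n : Int) 1).foldl (fun st _ => pvStepA st) (0, 0, 0) =
      if (n : Int) % 9 < 4 then ((0 : Int), (n : Int) / 9, (n : Int) % 9)
      else (1, (n : Int) / 9, (n : Int) % 9 - 4) := by
  induction n with
  | zero => simp [PySem.List.pyRange_one_eq_nil]
  | succ n ih =>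
    have hcast : ((n + 1 : Nat) : Int) = (n : Int) + 1 := by push_cast; ring
    rw [hcast, PySem.List.pyRange_one_succ_right (by positivity), List.foldl_append, ih]
    simp only [List.foldl]
    split_ifs with h1 <;>
      simp only [pvStepA] <;>
      split_ifs <;>
      simp only [Prod.mk.injEq, true_and] <;>
      omega

theorem convert_action_to_move_spec : Claim_equal_convert_action_to_move := by
  unfold Claim_equal_convert_action_to_move
  intro action _
  unfold Spec_convert_action_to_move convert_action_to_move convert_action_to_move_alt
  by_cases hle : action ≤ 0
  · rw [PySem.List.pyRange_one_eq_nil hle]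
    simp [hle]
  · have hpos : 0 < action := by omega
    obtain ⟨n, rfl⟩ : ∃ n : Nat, action = (n : Int) :=
      ⟨action.toNat, (Int.toNat_of_nonneg (by omega)).symm⟩
    rw [pv_loop_closed n,
        PySem.Int.floordiv_eq_ediv_of_pos (a := (n : Int)) (by norm_num),
        PySem.Int.mod_eq_emod_of_pos (a := (n : Int)) (by norm_num)]
    simp only [hle, if_false]
    split_ifs <;> rfl
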